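-- pv_equiv track=rewrite | github.com/askaross/personal-projects | CodingBat+exercises.py | withoutString
-- ===== SOURCE A (Python) =====
-- def withoutString(base, remove):
--
-- #Remove the occurence of the 'remove' string from the 'base' string. For example: withoutString('Hello', 'lo') will
-- #return 'Hel'.
--
--     #Turn strings into list so they are mutable
--     output = list(base)
--     span = len(remove)
--     overlap = 0
--
--     #Iterate over and remove the 'remove string'
--     for i in range(len(base) - span + 1):
--
--         if len(output) < span:
--             break
--
--         else:
--             if base[i+overlap:i+overlap+span] == remove:
--                 for j in range(i+overlap,i+overlap+span):
--                     output[j] = ''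
--                 overlap += span-1
--
--     return ''.join(output)
-- ===== SOURCE B (Python) =====
-- def withoutString(base, remove):
--     # One left-to-right skip-scan pass; empty 'remove' removes nothing.
--     if not remove:
--         return base
--     m = len(remove)
--     n = len(base)
--     out = []
--     i = 0
--     while i < n:
--         if base.startswith(remove, i):
--             i += m
--         else:
--             out.append(base[i])
--             i += 1
--     return ''.join(out)
-- ===== Notes on version B (the rewrite author's own statement) =====
-- stated objective: simpler
-- what changed: Replaces A's mutable char-list with blanking, overlap bookkeeping and a dead break guard by a single left-to-right skip-scan: at each position either skip len(remove) chars on a match or copy one char; empty remove returns base directly.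
import Mathlib
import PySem

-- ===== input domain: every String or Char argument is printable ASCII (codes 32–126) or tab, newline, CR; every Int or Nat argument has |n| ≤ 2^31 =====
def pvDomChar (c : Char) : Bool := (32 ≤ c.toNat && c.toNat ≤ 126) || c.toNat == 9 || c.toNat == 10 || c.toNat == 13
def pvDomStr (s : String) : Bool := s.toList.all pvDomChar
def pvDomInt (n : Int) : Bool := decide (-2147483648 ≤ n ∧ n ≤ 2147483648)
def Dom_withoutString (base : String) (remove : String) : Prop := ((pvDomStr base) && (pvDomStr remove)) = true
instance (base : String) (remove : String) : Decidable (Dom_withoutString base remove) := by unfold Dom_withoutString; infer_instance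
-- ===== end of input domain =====

-- B replaces A's mutable list + overlap bookkeeping by one left-to-right skip-scan (simpler; same behaviour incl. empty remove).

-- ===== PORT A =====
-- loop body of A's for-loop (state: output list of per-position fragments, overlap, broke flag)
def stepA (baseL remL : List Char) (span : Int)
    (st : List (List Char) × Int × Bool) (i : Int) : List (List Char) × Int × Bool :=
  match st with
  | (output, overlap, broke) =>
    if broke then (output, overlap, broke)
    else if (output.length : Int) < span then (output, overlap, true)
    else if PySem.List.slice baseL (some (i + overlap)) (some (i + overlap + span)) = remL then
      ((PySem.List.pyRange (i + overlap) (i + overlap + span) 1).foldl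
          (fun out j => out.set j.toNat ([] : List Char)) output,
       overlap + (span - 1), false)
    else (output, overlap, broke)

def withoutString (base : String) (remove : String) : String :=
  let baseL := base.toList
  let remL := remove.toList
  let span : Int := remL.length
  let output := baseL.map (fun c => [c])   -- list(base); output[j] = '' modeled as setting the fragment to []
  let res := (PySem.List.pyRange 0 ((baseL.length : Int) - span + 1) 1).foldl
      (stepA baseL remL span) (output, 0, false)
  String.ofList res.1.flatten   -- ''.join(output)

-- ===== PORT B =====
-- while-loop of Source B as structural recursion on the unread suffix (i ↔ consumed prefix)
def altGo (remL : List Char) : List Char → List Char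
  | [] => []
  | c :: rest =>
    if remL.isPrefixOf (c :: rest) then altGo remL (rest.drop (remL.length - 1))
    else c :: altGo remL rest
termination_by l => l.length
decreasing_by
  all_goals simp

def withoutString_alt (base : String) (remove : String) : String :=
  if remove = "" then base
  else String.ofList (altGo remove.toList base.toList)

-- ===== PRECONDITION & SPEC =====
def Spec_withoutString (base : String) (remove : String) (out : String) : Prop := out = withoutString_alt base remove
instance (base : String) (remove : String) (out : String) : Decidable (Spec_withoutString base remove out) := by unfold Spec_withoutString; infer_instance

-- ===== CLAIM (what is proved, stated in full; the proofs are below) =====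
def Claim_equal_withoutString : Prop := ∀ (base : String) (remove : String), Dom_withoutString base remove → Spec_withoutString base remove (withoutString base remove)

-- ===== LEMMAS AND PROOFS =====

lemma flatten_map_singleton (l : List Char) : (l.map (fun c => [c])).flatten = l := by
  induction l with
  | nil => rfl
  | cons c t ih => simp [ih]

-- span = 0: the fold never changes output and never sets broke
lemma foldA_span_zero (baseL : List Char) (is : List Int) :
    ∀ (st : List (List Char) × Int × Bool), st.2.2 = false →
      (is.foldl (stepA baseL [] 0) st).1 = st.1 ∧ (is.foldl (stepA baseL [] 0) st).2.2 = false := by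
  induction is with
  | nil => intro st h; exact ⟨rfl, h⟩
  | cons i t ih =>
    rintro ⟨output, ov, br⟩ h
    simp only at h
    subst h
    have hstep : stepA baseL [] 0 (output, ov, false) i = (output, ov + (0 - 1), false) ∨
        stepA baseL [] 0 (output, ov, false) i = (output, ov, false) := by
      simp only [stepA]
      rw [if_neg (by simp), if_neg (by simp)]
      split
      · left
        rw [PySem.List.pyRange_one_eq_nil (by omega)]
        rfl
      · right; rfl
    rcases hstep with hE | hE
    all_goals simp only [List.foldl_cons, hE]
    all_goals exact ih _ rfl

lemma altGo_short (remL suf : List Char) (h : suf.length < remL.length) :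
    altGo remL suf = suf := by
  induction suf with
  | nil => rw [altGo]
  | cons c rest ih =>
    rw [altGo]
    rw [if_neg, ih (by simp at h ⊢; omega)]
    intro hp
    have := List.IsPrefix.length_le (List.isPrefixOf_iff_prefix.mp hp)
    simp at this h
    omega

lemma blankFold (m' : Nat) :
    ∀ (pre suf : List (List Char)), m' ≤ suf.length →
      (PySem.List.pyRange (pre.length : Int) ((pre.length : Int) + (m' : Int)) 1).foldl
          (fun out j => out.set j.toNat ([] : List Char)) (pre ++ suf)
        = pre ++ List.replicate m' [] ++ suf.drop m' := by
  induction m' with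
  | zero =>
    intro pre suf h
    rw [show ((pre.length : Int) + ((0:Nat) : Int)) = (pre.length : Int) by push_cast; ring]
    rw [PySem.List.pyRange_one_eq_nil (le_refl _)]
    simp
  | succ k ih =>
    intro pre suf h
    cases suf with
    | nil => simp at h
    | cons s rest =>
      rw [PySem.List.pyRange_one_cons (by push_cast; omega)]
      simp only [List.foldl_cons]
      have hset : (pre ++ s :: rest).set ((pre.length : Int)).toNat [] = (pre ++ [[]]) ++ rest := by
        simp
      rw [hset]
      have hrange : PySem.List.pyRange ((pre.length : Int) + 1) ((pre.length : Int) + ((k+1 : Nat) : Int)) 1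
          = PySem.List.pyRange (((pre ++ [([] : List Char)]).length : Int)) ((((pre ++ [([] : List Char)]).length : Int)) + ((k : Nat) : Int)) 1 := by
        congr 1
        all_goals simp
        all_goals omega
      rw [hrange, ih (pre ++ [[]]) rest (by simp at h ⊢; omega)]
      simp [List.replicate_succ]

lemma tailLoop (baseL remL : List Char) (hrem : remL ≠ []) (is : List Int) :
    ∀ (output : List (List Char)) (ov : Int),
      (∀ i ∈ is, (baseL.length : Int) ≤ i + ov) →
      ((remL.length : Int) ≤ (output.length : Int)) →
      is.foldl (stepA baseL remL (remL.length : Int)) (output, ov, false) = (output, ov, false) := by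
  induction is with
  | nil => intro output ov _ _; rfl
  | cons i t ih =>
    intro output ov hmem hlen
    have hp : (baseL.length : Int) ≤ i + ov := hmem i (by simp)
    have hstep : stepA baseL remL (remL.length : Int) (output, ov, false) i = (output, ov, false) := by
      simp only [stepA]
      rw [if_neg (by simp), if_neg (by omega), if_neg]
      intro hsl
      apply hrem
      rw [← hsl, PySem.List.slice_toNat _ (by omega) (by omega),
        List.drop_eq_nil_of_le (by omega), List.take_nil]
    rw [List.foldl_cons, hstep]
    exact ih output ov (fun j hj => hmem j (by simp [hj])) hlen

lemma loopNil (baseL remL : List Char) (i ov : Int) (pre : List (List Char)) (suf : List Char)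
    (hK : (baseL.length : Int) - (remL.length : Int) + 1 ≤ i) (hov : 0 ≤ ov)
    (hrem : remL ≠ [])
    (hpos : i + ov = (baseL.length : Int) - suf.length) :
    (((PySem.List.pyRange i ((baseL.length : Int) - (remL.length : Int) + 1) 1).foldl
        (stepA baseL remL (remL.length : Int))
        (pre ++ suf.map (fun c => [c]), ov, false)).1).flatten
      = pre.flatten ++ altGo remL suf := by
  rw [PySem.List.pyRange_one_eq_nil hK, List.foldl_nil]
  have hshort : suf.length < remL.length := by
    have hm : 0 < remL.length := List.length_pos_of_ne_nil hrem
    omega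
  simp [altGo_short remL suf hshort, flatten_map_singleton]

lemma mainLoop (baseL remL : List Char) (hrem : remL ≠ []) :
    ∀ (fuel : Nat) (i ov : Int) (pre : List (List Char)) (suf : List Char),
      0 ≤ i → 0 ≤ ov →
      i + ov = (baseL.length : Int) - suf.length →
      baseL.drop (i + ov).toNat = suf →
      pre.length = (i + ov).toNat →
      fuel = (((baseL.length : Int) - remL.length + 1) - i).toNat →
      (((PySem.List.pyRange i ((baseL.length : Int) - (remL.length : Int) + 1) 1).foldl
          (stepA baseL remL (remL.length : Int))
          (pre ++ suf.map (fun c => [c]), ov, false)).1).flatten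
        = pre.flatten ++ altGo remL suf := by
  intro fuel
  induction fuel with
  | zero =>
    intro i ov pre suf hi hov hpos hdrop hpre hfuel
    exact loopNil baseL remL i ov pre suf (by omega) hov hrem hpos
  | succ f ih =>
    intro i ov pre suf hi hov hpos hdrop hpre hfuel
    have hm : 0 < remL.length := List.length_pos_of_ne_nil hrem
    by_cases hiK : i < (baseL.length : Int) - (remL.length : Int) + 1
    · cases suf with
      | nil =>
        rw [show (([] : List Char).map (fun c => [c])) = ([] : List (List Char)) from rfl,
          List.append_nil]
        rw [tailLoop baseL remL hrem _ pre ov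
          (by
            intro j hj
            have := (PySem.List.mem_pyRange_one.mp hj).1
            simp at hpos
            omega)
          (by simp at hpos ⊢; omega)]
        rw [altGo]
        simp
      | cons c rest =>
        rw [PySem.List.pyRange_one_cons hiK, List.foldl_cons]
        have hp0 : 0 ≤ i + ov := by omega
        have hlENpos : i + ov = (baseL.length : Int) - ((rest.length : Int) + 1) := by
          simp at hpos; omega
        have hslice : PySem.List.slice baseL (some (i + ov)) (some (i + ov + (remL.length : Int)))
            = (c :: rest).take remL.length := by
          rw [PySem.List.slice_toNat _ (by omega) (by omega),
            show ((i + ov + (remL.length : Int)).toNat - (i + ov).toNat) = remL.length by omega,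
            hdrop]
        have hlenout : ¬ (((pre ++ (c :: rest).map (fun c => [c])).length : Int) < (remL.length : Int)) := by
          simp [hpre]
          omega
        by_cases hmatch : (c :: rest).take remL.length = remL
        · have hmle : remL.length ≤ rest.length + 1 := by
            have := congrArg List.length hmatch
            simp at this
            omega
          have hstep : stepA baseL remL (remL.length : Int)
              (pre ++ (c :: rest).map (fun c => [c]), ov, false) i
              = (pre ++ List.replicate remL.length [] ++ ((c :: rest).drop remL.length).map (fun c => [c]),
                 ov + ((remL.length : Int) - 1), false) := by
            simp only [stepA]
            rw [if_neg (by simp), if_neg hlenout, if_pos (by rw [hslice]; exact hmatch)]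
            rw [show i + ov = ((pre.length : Int)) by omega,
              show ((pre.length : Int)) + (remL.length : Int) = ((pre.length : Int)) + ((remL.length : Nat) : Int) from rfl]
            rw [blankFold remL.length pre ((c :: rest).map (fun c => [c])) (by simp; omega)]
            rw [show (((c :: rest).map (fun c => [c])).drop remL.length) = (((c :: rest).drop remL.length).map (fun c => [c])) by simp]
          rw [hstep]
          have := ih (i + 1) (ov + ((remL.length : Int) - 1))
            (pre ++ List.replicate remL.length []) ((c :: rest).drop remL.length)
            (by omega) (by omega)
            (by simp; omega)
            (by
              rw [show (i + 1 + (ov + ((remL.length : Int) - 1))).toNat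
                  = (i + ov).toNat + remL.length by omega]
              rw [← List.drop_drop, hdrop])
            (by simp [hpre]; omega)
            (by omega)
          rw [this]
          have hflat : (pre ++ List.replicate remL.length ([] : List Char)).flatten = pre.flatten := by
            simp
          rw [hflat]
          rw [altGo, if_pos (List.isPrefixOf_iff_prefix.mpr (hmatch ▸ List.take_prefix remL.length (c :: rest)))]
          obtain ⟨m', hm'⟩ : ∃ m', remL.length = m' + 1 := ⟨remL.length - 1, by omega⟩
          rw [hm']
          simp [List.drop_succ_cons]
        · have hstep : stepA baseL remL (remL.length : Int)
              (pre ++ (c :: rest).map (fun c => [c]), ov, false) i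
              = (pre ++ (c :: rest).map (fun c => [c]), ov, false) := by
            simp only [stepA]
            rw [if_neg (by simp), if_neg hlenout, if_neg (by rw [hslice]; exact hmatch)]
          rw [hstep]
          have hregroup : pre ++ (c :: rest).map (fun c => [c])
              = (pre ++ [[c]]) ++ rest.map (fun c => [c]) := by
            simp
          rw [hregroup]
          have := ih (i + 1) ov (pre ++ [[c]]) rest
            (by omega) hov
            (by simp at hpos ⊢; omega)
            (by
              rw [show (i + 1 + ov).toNat = (i + ov).toNat + 1 by omega]
              rw [← List.drop_drop, hdrop]
              rfl)
            (by simp [hpre]; omega)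
            (by omega)
          rw [this]
          rw [altGo, if_neg (by
            intro hpf
            exact hmatch ((List.prefix_iff_eq_take.mp (List.isPrefixOf_iff_prefix.mp hpf)).symm))]
          simp
    · exact loopNil baseL remL i ov pre suf (by omega) (by omega) hrem hpos

-- ===== VERDICT (by name: the statement is the Claim_ definition above) =====
theorem withoutString_spec : Claim_equal_withoutString := by
  unfold Claim_equal_withoutString
  intro base remove _
  unfold Spec_withoutString
  by_cases hrem : remove = ""
  · subst hrem
    simp only [withoutString, withoutString_alt]
    rw [show "".toList = ([] : List Char) from rfl]
    rw [show ((([] : List Char).length : Nat) : Int) = 0 from rfl]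
    rw [(foldA_span_zero base.toList _ (base.toList.map (fun c => [c]), 0, false) rfl).1]
    rw [flatten_map_singleton]
    exact String.ofList_toList
  · have hremL : remove.toList ≠ [] := by
      intro h
      exact hrem (by rw [← @String.ofList_toList remove, h])
    simp only [withoutString, withoutString_alt, if_neg hrem]
    have := mainLoop base.toList remove.toList hremL
      ((((base.toList.length : Int) - (remove.toList.length : Int) + 1) - 0).toNat)
      0 0 [] base.toList (le_refl 0) (le_refl 0)
      (by omega) rfl rfl rfl
    simp only [List.flatten_nil, List.nil_append] at this
    exact congrArg String.ofList this
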